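-- pv_equiv track=rewrite | github.com/fraiseql/fraiseql | tools/validate-markdown.py | check_code_blocks
-- ===== SOURCE A (Python) =====
-- from typing import List, Tuple, Dict
--
-- def check_code_blocks(lines: List[str], file_path: str) -> Tuple[bool, List[str]]:
--     """Check for unclosed code blocks"""
--     issues = []
--     in_code_block = False
--     code_fence_line = 0
--
--     for i, line in enumerate(lines, 1):
--         # Count code fences
--         code_fences = line.count('```')
--
--         if code_fences % 2 == 1:  # Odd number of fences toggles state
--             if in_code_block:
--                 in_code_block = False
--             else:
--                 in_code_block = True
--                 code_fence_line = i
--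
--     if in_code_block:
--         issues.append(f"Line {code_fence_line}: Unclosed code block")
--
--     return len(issues) == 0, issues
-- ===== SOURCE B (Python) =====
-- from typing import List, Tuple
--
-- def check_code_blocks(lines: List[str], file_path: str) -> Tuple[bool, List[str]]:
--     """Check for unclosed code blocks"""
--     # Parity of the total number of ``` fences equals the parity of toggle events,
--     # so the file has an unclosed block iff the total fence count is odd;
--     # the unclosed opening is then the last line with an odd fence count.
--     if sum(line.count('```') for line in lines) % 2 == 0:
--         return True, []
--     for i, line in reversed(list(enumerate(lines, 1))):
--         if line.count('```') % 2 == 1: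
--             return False, [f"Line {i}: Unclosed code block"]
-- ===== Notes on version B (the rewrite author's own statement) =====
-- stated objective: alternative
-- what changed: Replaces A's single stateful forward scan (toggled in_code_block boolean with a conditionally captured opening line) by two stateless passes: a global fence-count sum whose parity alone decides closedness (parity of a sum equals parity of the number of odd terms), and, only when odd, a backward scan that stops at the first odd-fence line from the end.
import Mathlib
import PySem

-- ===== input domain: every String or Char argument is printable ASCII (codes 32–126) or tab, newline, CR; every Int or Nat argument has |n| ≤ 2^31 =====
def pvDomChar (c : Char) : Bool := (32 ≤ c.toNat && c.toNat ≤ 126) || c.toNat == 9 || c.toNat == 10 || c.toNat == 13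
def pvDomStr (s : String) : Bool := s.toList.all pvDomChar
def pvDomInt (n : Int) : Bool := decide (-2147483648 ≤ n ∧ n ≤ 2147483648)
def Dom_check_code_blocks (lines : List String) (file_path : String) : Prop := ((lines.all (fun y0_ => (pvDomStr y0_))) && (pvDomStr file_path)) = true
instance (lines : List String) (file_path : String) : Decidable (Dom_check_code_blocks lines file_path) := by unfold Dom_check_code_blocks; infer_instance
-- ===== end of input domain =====

-- B replaces A's stateful forward toggle scan by two stateless passes: the parity of the
-- total fence count decides closedness, and a backward scan finds the offending line (objective: alternative).

-- ===== PORT A =====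
def check_code_blocks (lines : List String) (file_path : String) : Bool × List String :=
  -- state: (in_code_block, code_fence_line)
  let st : Bool × Int := (PySem.List.enumerate lines 1).foldl
    (fun (s : Bool × Int) p =>
      let code_fences := PySem.Str.count p.2 "```"
      if code_fences % 2 == 1 then
        if s.1 then (false, s.2) else (true, p.1)
      else s)
    (false, 0)
  let issues : List String :=
    if st.1 then ["Line " ++ PySem.Int.toStr st.2 ++ ": Unclosed code block"] else []
  (issues.length == 0, issues)

-- ===== PORT B =====
def check_code_blocks_alt (lines : List String) (file_path : String) : Bool × List String :=
  if (lines.map (fun line => PySem.Str.count line "```")).sum % 2 == 0 then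
    (true, [])
  else
    match (PySem.List.enumerate lines 1).reverse.find?
        (fun p => PySem.Str.count p.2 "```" % 2 == 1) with
    | some p => (false, ["Line " ++ PySem.Int.toStr p.1 ++ ": Unclosed code block"])
    | none => (true, [])  -- unreachable: an odd total implies some line has an odd count

-- ===== PRECONDITION & SPEC =====
def Spec_check_code_blocks (lines : List String) (file_path : String) (out : Bool × List String) : Prop := out = check_code_blocks_alt lines file_path
instance (lines : List String) (file_path : String) (out : Bool × List String) : Decidable (Spec_check_code_blocks lines file_path out) := by unfold Spec_check_code_blocks; infer_instance

-- ===== CLAIM (what is proved, stated in full; the proofs are below) =====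
def Claim_equal_check_code_blocks : Prop := ∀ (lines : List String) (file_path : String), Dom_check_code_blocks lines file_path → Spec_check_code_blocks lines file_path (check_code_blocks lines file_path)

-- ===== LEMMAS AND PROOFS =====

-- last opening line tracked by A's toggle loop, as a function of the toggle-line list
def pvLastOpen : Bool → Int → List Int → Int
  | _, l, [] => l
  | false, _, t :: ts => pvLastOpen true t ts
  | true, l, t :: ts => pvLastOpen false l ts

-- the (1-indexed) line numbers whose fence count is odd
def pvTog (ls : List String) (i : Int) : List Int :=
  ((PySem.List.enumerate ls i).filter (fun p => PySem.Str.count p.2 "```" % 2 == 1)).map (·.1)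

theorem pvTog_nil (i : Int) : pvTog [] i = [] := rfl

theorem pvTog_cons (x : String) (ls : List String) (i : Int) :
    pvTog (x :: ls) i =
      if PySem.Str.count x "```" % 2 == 1 then i :: pvTog ls (i + 1) else pvTog ls (i + 1) := by
  simp only [pvTog, PySem.List.enumerate_cons, List.filter_cons]
  split_ifs <;> simp_all

theorem pvFoldA (ls : List String) : ∀ (i : Int) (b : Bool) (l : Int),
    (PySem.List.enumerate ls i).foldl
      (fun (s : Bool × Int) p =>
        let code_fences := PySem.Str.count p.2 "```"
        if code_fences % 2 == 1 then
          if s.1 then (false, s.2) else (true, p.1)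
        else s)
      (b, l)
    = (xor ((pvTog ls i).length % 2 == 1) b, pvLastOpen b l (pvTog ls i)) := by
  induction ls with
  | nil => intro i b l; simp [pvTog_nil, pvLastOpen]
  | cons x ls ih =>
    intro i b l
    rw [PySem.List.enumerate_cons, List.foldl_cons, pvTog_cons]
    by_cases hx : (PySem.Str.count x "```" % 2 == 1) = true
    · rw [if_pos hx, if_pos hx]
      cases b with
      | false =>
        rw [show (if ((false, l).1 = true) then ((false : Bool), (false, l).2)
              else ((true : Bool), i)) = ((true : Bool), i) from rfl, ih]
        have hlo : pvLastOpen false l (i :: pvTog ls (i + 1))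
            = pvLastOpen true i (pvTog ls (i + 1)) := rfl
        rw [hlo]
        simp only [Prod.mk.injEq, List.length_cons]
        refine ⟨?_, trivial⟩
        rcases Nat.mod_two_eq_zero_or_one (pvTog ls (i + 1)).length with h | h
        · have h2 : ((pvTog ls (i + 1)).length + 1) % 2 = 1 := by omega
          simp [h, h2]
        · have h2 : ((pvTog ls (i + 1)).length + 1) % 2 = 0 := by omega
          simp [h, h2]
      | true =>
        rw [show (if ((true, l).1 = true) then ((false : Bool), (true, l).2)
              else ((true : Bool), i)) = ((false : Bool), l) from rfl, ih]
        have hlo : pvLastOpen true l (i :: pvTog ls (i + 1))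
            = pvLastOpen false l (pvTog ls (i + 1)) := rfl
        rw [hlo]
        simp only [Prod.mk.injEq, List.length_cons]
        refine ⟨?_, trivial⟩
        rcases Nat.mod_two_eq_zero_or_one (pvTog ls (i + 1)).length with h | h
        · have h2 : ((pvTog ls (i + 1)).length + 1) % 2 = 1 := by omega
          simp [h, h2]
        · have h2 : ((pvTog ls (i + 1)).length + 1) % 2 = 0 := by omega
          simp [h, h2]
    · rw [if_neg hx, if_neg hx]
      exact ih (i + 1) b l

theorem pvLastOpen_getLast : ∀ (ts : List Int) (l : Int),
    (ts.length % 2 = 1 → pvLastOpen false l ts = ts.getLastD 0) ∧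
    (ts ≠ [] → ts.length % 2 = 0 → pvLastOpen true l ts = ts.getLastD 0) := by
  intro ts
  induction ts with
  | nil => intro l; constructor <;> intro h <;> simp_all
  | cons t ts ih =>
    intro l
    constructor
    · intro hodd
      have hts : ts.length % 2 = 0 := by simp at hodd; omega
      show pvLastOpen true t ts = (t :: ts).getLastD 0
      cases ts with
      | nil => rfl
      | cons u us =>
        rw [(ih t).2 (by simp) hts]
        simp
    · intro _ heven
      have hts : ts.length % 2 = 1 := by simp at heven; omega
      have hne : ts ≠ [] := by intro h; simp [h] at hts
      show pvLastOpen false l ts = (t :: ts).getLastD 0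
      rw [(ih l).1 hts]
      cases ts with
      | nil => exact absurd rfl hne
      | cons u us => simp

-- parity of a sum of naturals equals the parity of the number of odd summands
theorem pvSumParity (ls : List String) : ∀ (i : Int),
    (ls.map (fun line => PySem.Str.count line "```")).sum % 2 = (pvTog ls i).length % 2 := by
  induction ls with
  | nil => intro i; simp [pvTog_nil]
  | cons x ls ih =>
    intro i
    rw [pvTog_cons, List.map_cons, List.sum_cons]
    by_cases hx : (PySem.Str.count x "```" % 2 == 1) = true
    · have hx1 : PySem.Str.count x "```" % 2 = 1 := by
        have := of_decide_eq_true hx; omega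
      rw [if_pos hx]
      have := ih (i + 1)
      simp only [List.length_cons]
      omega
    · have hx0 : PySem.Str.count x "```" % 2 = 0 := by
        rcases Nat.mod_two_eq_zero_or_one (PySem.Str.count x "```") with h | h
        · exact h
        · exact absurd (by rw [h]; rfl) hx
      rw [if_neg hx]
      have := ih (i + 1)
      omega

-- find? from the back = last element of the filtered list
theorem pvFindRev {α : Type} (p : α → Bool) :
    ∀ (l : List α), l.reverse.find? p = (l.filter p).getLast? := by
  intro l
  induction l with
  | nil => rfl
  | cons x xs ih =>
    rw [List.reverse_cons, List.find?_append, ih, List.filter_cons]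
    by_cases hx : p x = true
    · rw [if_pos hx]
      cases h : xs.filter p with
      | nil => simp [hx]
      | cons a as =>
        rw [List.getLast?_cons_cons]
        cases hg : (a :: as).getLast? with
        | none => simp at hg
        | some y => simp
    · rw [if_neg hx]
      cases hfl : (xs.filter p).getLast? with
      | none => simp [List.find?, hx]
      | some y => rfl

-- ===== VERDICT (by name: the statement is the Claim_ definition above) =====
theorem check_code_blocks_spec : Claim_equal_check_code_blocks := by
  intro lines file_path _
  unfold Spec_check_code_blocks check_code_blocks check_code_blocks_alt
  rw [pvFoldA, pvFindRev, pvSumParity lines 1]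
  have htog : ((PySem.List.enumerate lines 1).filter
      (fun p => PySem.Str.count p.2 "```" % 2 == 1)).map (·.1) = pvTog lines 1 := rfl
  by_cases h : (pvTog lines 1).length % 2 = 1
  · rw [(pvLastOpen_getLast (pvTog lines 1) 0).1 h]
    have hne : (PySem.List.enumerate lines 1).filter
        (fun p => PySem.Str.count p.2 "```" % 2 == 1) ≠ [] := by
      intro hfl
      have : pvTog lines 1 = [] := by rw [← htog, hfl]; rfl
      rw [this] at h; simp at h
    cases hfl : ((PySem.List.enumerate lines 1).filter
        (fun p => PySem.Str.count p.2 "```" % 2 == 1)).getLast? with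
    | none => exact absurd (List.getLast?_eq_none_iff.mp hfl) hne
    | some q =>
      have hq1 : (pvTog lines 1).getLast?.getD 0 = q.1 := by
        have := List.getLast?_map (f := (·.1 : Int × String → Int))
          (l := (PySem.List.enumerate lines 1).filter
            (fun p => PySem.Str.count p.2 "```" % 2 == 1))
        rw [hfl] at this
        show (List.map (fun x => x.1) (List.filter (fun p => PySem.Str.count p.2 "```" % 2 == 1) (PySem.List.enumerate lines 1))).getLast?.getD 0 = q.1
        rw [this]
        rfl
      simp [h, hq1]
  · have h0 : (pvTog lines 1).length % 2 = 0 := by omega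
    rw [(show ((pvTog lines 1).length % 2 == 1) = false by simp [h0])]
    simp [h0]
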